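-- pv_equiv track=rewrite | github.com/Drago-03/FSociety-ai | backend/src/document_verification.py | detect_document_category
-- ===== SOURCE A (Python) =====
-- def detect_document_category(filename: str, text_content: str) -> str:
--     """Detect the category of a document based on filename and content"""
--     filename_lower = filename.lower()
--     text_lower = text_content.lower()
--
--     # Check filename first
--     if any(term in filename_lower for term in ["contract", "agreement", "terms", "legal"]):
--         return "legal_document"
--     elif any(term in filename_lower for term in ["report", "financial", "balance", "income", "statement"]):
--         return "financial_document"
--     elif any(term in filename_lower for term in ["policy", "handbook", "manual", "guide"]):
--         return "policy_document"
--     elif any(term in filename_lower for term in ["id", "passport", "license", "certificate"]):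
--         return "identity_document"
--
--     # Check content if filename doesn't provide enough information
--     if any(term in text_lower for term in ["contract", "agreement", "parties", "hereby", "terms", "conditions"]):
--         return "legal_document"
--     elif any(term in text_lower for term in ["financial", "revenue", "profit", "loss", "balance", "income", "statement"]):
--         return "financial_document"
--     elif any(term in text_lower for term in ["policy", "procedure", "guideline", "handbook"]):
--         return "policy_document"
--     elif any(term in text_lower for term in ["identification", "passport", "license", "certificate", "birth"]):
--         return "identity_document"
--
--     # Default category
--     return "general_document"
-- ===== SOURCE B (Python) =====
-- CATEGORIES = ("legal_document", "financial_document", "policy_document", "identity_document")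
--
-- # Flat alphabetical keyword index: keyword -> priority.
-- # Priorities 0-3 search the filename, 4-7 the content (priority // 4 picks the
-- # haystack); the category is CATEGORIES[priority % 4].  The scan keeps a running
-- # minimum priority, so the table order is irrelevant.
-- KEYWORD_PRIORITIES = [
--     ('agreement', 0),
--     ('agreement', 4),
--     ('balance', 1),
--     ('balance', 5),
--     ('birth', 7),
--     ('certificate', 3),
--     ('certificate', 7),
--     ('conditions', 4),
--     ('contract', 0),
--     ('contract', 4),
--     ('financial', 1),
--     ('financial', 5),
--     ('guide', 2),
--     ('guideline', 6),
--     ('handbook', 2),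
--     ('handbook', 6),
--     ('hereby', 4),
--     ('id', 3),
--     ('identification', 7),
--     ('income', 1),
--     ('income', 5),
--     ('legal', 0),
--     ('license', 3),
--     ('license', 7),
--     ('loss', 5),
--     ('manual', 2),
--     ('parties', 4),
--     ('passport', 3),
--     ('passport', 7),
--     ('policy', 2),
--     ('policy', 6),
--     ('procedure', 6),
--     ('profit', 5),
--     ('report', 1),
--     ('revenue', 5),
--     ('statement', 1),
--     ('statement', 5),
--     ('terms', 0),
--     ('terms', 4),
-- ]
--
--
-- def detect_document_category(filename: str, text_content: str) -> str:
--     """Detect the category of a document based on filename and content"""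
--     haystacks = (filename.lower(), text_content.lower())
--     best = 8
--     for term, priority in KEYWORD_PRIORITIES:
--         if term in haystacks[priority // 4]:
--             best = min(best, priority)
--     return CATEGORIES[best % 4] if best < 8 else "general_document"
-- ===== Notes on version B (the rewrite author's own statement) =====
-- stated objective: alternative
-- what changed: Replaced the eight ordered if/elif any-substring branches by one flat alphabetical keyword->priority table scanned in a single pass that keeps the minimum matched priority (priority//4 picks filename vs content, priority%4 the category), with the order-independence of the scan proved via a permutation argument.
import Mathlib
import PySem

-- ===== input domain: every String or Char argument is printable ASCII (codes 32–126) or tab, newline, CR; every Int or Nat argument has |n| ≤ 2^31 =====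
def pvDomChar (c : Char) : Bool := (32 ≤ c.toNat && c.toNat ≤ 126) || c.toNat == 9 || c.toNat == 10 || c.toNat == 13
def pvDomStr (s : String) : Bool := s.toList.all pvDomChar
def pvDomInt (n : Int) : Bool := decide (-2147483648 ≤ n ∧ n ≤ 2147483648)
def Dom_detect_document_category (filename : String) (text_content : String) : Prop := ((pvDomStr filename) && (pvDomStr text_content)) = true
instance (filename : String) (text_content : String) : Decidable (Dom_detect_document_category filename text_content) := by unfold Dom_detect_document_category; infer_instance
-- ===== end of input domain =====

-- B replaces the eight ordered if/elif branches by one flat alphabetical keyword->priority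
-- table scanned in a single pass keeping the minimum matched priority (alternative, same cost).


-- ===== PORT A =====
def detect_document_category (filename : String) (text_content : String) : String :=
  let filename_lower := PySem.Str.lower filename
  let text_lower := PySem.Str.lower text_content
  if ["contract", "agreement", "terms", "legal"].any (fun term => PySem.Str.isIn term filename_lower) then
    "legal_document"
  else if ["report", "financial", "balance", "income", "statement"].any (fun term => PySem.Str.isIn term filename_lower) then
    "financial_document"
  else if ["policy", "handbook", "manual", "guide"].any (fun term => PySem.Str.isIn term filename_lower) then
    "policy_document"
  else if ["id", "passport", "license", "certificate"].any (fun term => PySem.Str.isIn term filename_lower) then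
    "identity_document"
  else if ["contract", "agreement", "parties", "hereby", "terms", "conditions"].any (fun term => PySem.Str.isIn term text_lower) then
    "legal_document"
  else if ["financial", "revenue", "profit", "loss", "balance", "income", "statement"].any (fun term => PySem.Str.isIn term text_lower) then
    "financial_document"
  else if ["policy", "procedure", "guideline", "handbook"].any (fun term => PySem.Str.isIn term text_lower) then
    "policy_document"
  else if ["identification", "passport", "license", "certificate", "birth"].any (fun term => PySem.Str.isIn term text_lower) then
    "identity_document"
  else
    "general_document"

-- ===== PORT B =====
-- B: one flat alphabetical keyword -> priority table; priority / 4 selects the haystack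
-- (0 = filename, 1 = content), priority % 4 the category; a single pass keeps the minimum.
def pvCategories : List String :=
  ["legal_document", "financial_document", "policy_document", "identity_document"]

def pvKeywordPriorities : List (String × Nat) :=
  [("agreement", 0), ("agreement", 4), ("balance", 1), ("balance", 5), ("birth", 7),
   ("certificate", 3), ("certificate", 7), ("conditions", 4), ("contract", 0), ("contract", 4),
   ("financial", 1), ("financial", 5), ("guide", 2), ("guideline", 6), ("handbook", 2),
   ("handbook", 6), ("hereby", 4), ("id", 3), ("identification", 7), ("income", 1),
   ("income", 5), ("legal", 0), ("license", 3), ("license", 7), ("loss", 5),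
   ("manual", 2), ("parties", 4), ("passport", 3), ("passport", 7), ("policy", 2),
   ("policy", 6), ("procedure", 6), ("profit", 5), ("report", 1), ("revenue", 5),
   ("statement", 1), ("statement", 5), ("terms", 0), ("terms", 4)]

-- the loop body of Source B
def pvStep (f t : String) (best : Nat) (p : String × Nat) : Nat :=
  if PySem.Str.isIn p.1 (if p.2 / 4 == 0 then f else t) then min best p.2 else best

def detect_document_category_alt (filename : String) (text_content : String) : String :=
  let f := PySem.Str.lower filename
  let t := PySem.Str.lower text_content
  let best := pvKeywordPriorities.foldl (pvStep f t) 8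
  if best < 8 then pvCategories.getD (best % 4) "general_document" else "general_document"

-- ===== PRECONDITION & SPEC =====
def Spec_detect_document_category (filename : String) (text_content : String) (out : String) : Prop := out = detect_document_category_alt filename text_content
instance (filename : String) (text_content : String) (out : String) : Decidable (Spec_detect_document_category filename text_content out) := by unfold Spec_detect_document_category; infer_instance

-- ===== CLAIM (what is proved, stated in full; the proofs are below) =====
def Claim_equal_detect_document_category : Prop := ∀ (filename : String) (text_content : String), Dom_detect_document_category filename text_content → Spec_detect_document_category filename text_content (detect_document_category filename text_content)

-- ===== LEMMAS AND PROOFS =====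

-- the same table, regrouped by priority (proof-only helper)
def pvGrouped : List (String × Nat) :=
  (["contract", "agreement", "terms", "legal"].map (fun s => (s, 0))) ++
  (["report", "financial", "balance", "income", "statement"].map (fun s => (s, 1))) ++
  (["policy", "handbook", "manual", "guide"].map (fun s => (s, 2))) ++
  (["id", "passport", "license", "certificate"].map (fun s => (s, 3))) ++
  (["contract", "agreement", "parties", "hereby", "terms", "conditions"].map (fun s => (s, 4))) ++
  (["financial", "revenue", "profit", "loss", "balance", "income", "statement"].map (fun s => (s, 5))) ++
  (["policy", "procedure", "guideline", "handbook"].map (fun s => (s, 6))) ++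
  (["identification", "passport", "license", "certificate", "birth"].map (fun s => (s, 7)))

theorem pvStep_rightComm (f t : String) (b : Nat) (x y : String × Nat) :
    pvStep f t (pvStep f t b x) y = pvStep f t (pvStep f t b y) x := by
  simp only [pvStep]; split_ifs <;> omega

theorem pvPerm : pvKeywordPriorities.Perm pvGrouped := by decide

theorem pvFold_perm (f t : String) :
    pvKeywordPriorities.foldl (pvStep f t) 8 = pvGrouped.foldl (pvStep f t) 8 :=
  pvPerm.foldl_eq' (fun x _ y _ z => pvStep_rightComm f t z x y) 8

theorem pvFold_seg (f t : String) (r : Nat) (terms : List String) (b : Nat) :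
    (terms.map (fun s => (s, r))).foldl (pvStep f t) b
      = if terms.any (fun s => PySem.Str.isIn s (if r / 4 == 0 then f else t)) then min b r else b := by
  induction terms generalizing b with
  | nil => simp
  | cons h rest ih =>
      simp only [List.map_cons, List.foldl_cons, List.any_cons, pvStep, ih]
      split_ifs <;> try omega
      all_goals simp_all
      all_goals (rename_i hall hone hex
                 obtain ⟨x, hx, hx2⟩ := hex
                 have := hall x hx
                 simp [this] at hx2)

-- ===== VERDICT (by name: the statement is the Claim_ definition above) =====
set_option maxHeartbeats 1000000 in
theorem detect_document_category_spec : Claim_equal_detect_document_category := by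
  intro filename text_content _
  unfold Spec_detect_document_category detect_document_category detect_document_category_alt
  simp only [pvFold_perm, pvGrouped, List.foldl_append, pvFold_seg, Nat.reduceDiv,
    Nat.reduceBEq, Bool.false_eq_true, if_false, if_true]
  generalize (["contract", "agreement", "terms", "legal"].any fun term => PySem.Str.isIn term (PySem.Str.lower filename)) = c0
  generalize (["report", "financial", "balance", "income", "statement"].any fun term => PySem.Str.isIn term (PySem.Str.lower filename)) = c1
  generalize (["policy", "handbook", "manual", "guide"].any fun term => PySem.Str.isIn term (PySem.Str.lower filename)) = c2
  generalize (["id", "passport", "license", "certificate"].any fun term => PySem.Str.isIn term (PySem.Str.lower filename)) = c3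
  generalize (["contract", "agreement", "parties", "hereby", "terms", "conditions"].any fun term => PySem.Str.isIn term (PySem.Str.lower text_content)) = c4
  generalize (["financial", "revenue", "profit", "loss", "balance", "income", "statement"].any fun term => PySem.Str.isIn term (PySem.Str.lower text_content)) = c5
  generalize (["policy", "procedure", "guideline", "handbook"].any fun term => PySem.Str.isIn term (PySem.Str.lower text_content)) = c6
  generalize (["identification", "passport", "license", "certificate", "birth"].any fun term => PySem.Str.isIn term (PySem.Str.lower text_content)) = c7
  revert c0 c1 c2 c3 c4 c5 c6 c7
  decide
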